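-- pv_equiv track=rewrite | github.com/shwetalj/executioner | tools/merge_configs.py | detect_job_id_conflicts
-- ===== SOURCE A (Python) =====
-- from typing import Dict, List, Any, Set
--
-- def detect_job_id_conflicts(configs_with_jobs: List[tuple]) -> Dict[str, List[str]]:
--     """Detect job ID conflicts across configurations.
--
--     Returns a dict mapping job IDs to list of config files that contain them.
--     """
--     job_id_to_configs = {}
--
--     for config_file, jobs in configs_with_jobs:
--         for job in jobs:
--             job_id = job['id']
--             if job_id not in job_id_to_configs:
--                 job_id_to_configs[job_id] = []
--             job_id_to_configs[job_id].append(config_file)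
--
--     # Return only job IDs that appear in multiple configs
--     conflicts = {job_id: configs for job_id, configs in job_id_to_configs.items()
--                  if len(configs) > 1}
--
--     return conflicts
-- ===== SOURCE B (Python) =====
-- def detect_job_id_conflicts(configs_with_jobs):
--     """Two-pass: count appearances of each job id, then emit conflicts directly."""
--     counts = {}
--     for config_file, jobs in configs_with_jobs:
--         for job in jobs:
--             jid = job['id']
--             counts[jid] = counts.get(jid, 0) + 1
--     conflicts = {}
--     for config_file, jobs in configs_with_jobs:
--         for job in jobs:
--             jid = job['id']
--             if counts[jid] > 1:
--                 conflicts.setdefault(jid, []).append(config_file)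
--     return conflicts
-- ===== Notes on version B (the rewrite author's own statement) =====
-- stated objective: alternative
-- what changed: B replaces A's build-the-full-id-to-configs-dict-then-filter-by-list-length with a counting first pass (dict of appearance counts) and a second pass that appends config files directly for ids whose total count exceeds 1.
import Mathlib
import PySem

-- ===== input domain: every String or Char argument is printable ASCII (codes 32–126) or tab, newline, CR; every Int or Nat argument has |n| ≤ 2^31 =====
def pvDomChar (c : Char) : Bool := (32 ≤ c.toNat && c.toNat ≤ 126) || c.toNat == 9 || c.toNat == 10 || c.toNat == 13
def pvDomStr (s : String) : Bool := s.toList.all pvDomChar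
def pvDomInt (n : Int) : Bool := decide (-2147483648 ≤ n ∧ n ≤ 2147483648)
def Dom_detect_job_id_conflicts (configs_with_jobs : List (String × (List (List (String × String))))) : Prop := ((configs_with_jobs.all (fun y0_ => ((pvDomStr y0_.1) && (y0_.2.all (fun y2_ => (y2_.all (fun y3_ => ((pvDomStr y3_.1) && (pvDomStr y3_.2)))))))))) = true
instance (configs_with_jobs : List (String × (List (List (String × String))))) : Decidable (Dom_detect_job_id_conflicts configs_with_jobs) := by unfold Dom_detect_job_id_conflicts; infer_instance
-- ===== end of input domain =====

-- B replaces "build the full id → [configs] dict, then filter by list length" with a counting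
-- first pass plus a second pass that emits conflicts directly (objective: alternative decomposition).

-- job['id']: first-match lookup in the job association list (total form; Pre_ guarantees the key exists)
def pvJobId (job : List (String × String)) : String :=
  ((PySem.Dict.mk job).get? "id").getD ""

-- ===== PORT A =====
def detect_job_id_conflicts (configs_with_jobs : List (String × (List (List (String × String))))) : List (String × List String) :=
  let job_id_to_configs : PySem.Dict String (List String) :=
    configs_with_jobs.foldl (fun d p =>
      p.2.foldl (fun d job => d.modify (pvJobId job) [] (· ++ [p.1])) d) PySem.Dict.empty
  (job_id_to_configs.items).filter (fun q => decide (1 < q.2.length))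

-- ===== PORT B =====
def detect_job_id_conflicts_alt (configs_with_jobs : List (String × (List (List (String × String))))) : List (String × List String) :=
  let counts : PySem.Dict String Int :=
    configs_with_jobs.foldl (fun c p =>
      p.2.foldl (fun c job => c.modify (pvJobId job) 0 (· + 1)) c) PySem.Dict.empty
  let conflicts : PySem.Dict String (List String) :=
    configs_with_jobs.foldl (fun d p =>
      p.2.foldl (fun d job =>
        if (1 : Int) < counts.getD (pvJobId job) 0 then d.modify (pvJobId job) [] (· ++ [p.1]) else d) d)
      PySem.Dict.empty
  conflicts.items

-- ===== PRECONDITION & SPEC =====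
-- Pre_ excludes exactly the inputs where some job dict lacks the key 'id', on which Python A raises KeyError.
def Pre_detect_job_id_conflicts (configs_with_jobs : List (String × (List (List (String × String))))) : Prop :=
  (configs_with_jobs.all (fun p => p.2.all (fun job => job.any (fun kv => kv.1 == "id")))) = true
instance (configs_with_jobs : List (String × (List (List (String × String))))) : Decidable (Pre_detect_job_id_conflicts configs_with_jobs) := by unfold Pre_detect_job_id_conflicts; infer_instance
def pvWitness_detect_job_id_conflicts : (List (String × (List (List (String × String))))) :=
  [("a.yaml", [[("id", "build")], [("id", "test")]]), ("b.yaml", [[("id", "build")]])]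
def Spec_detect_job_id_conflicts (configs_with_jobs : List (String × (List (List (String × String))))) (out : List (String × List String)) : Prop := out = detect_job_id_conflicts_alt configs_with_jobs
instance (configs_with_jobs : List (String × (List (List (String × String))))) (out : List (String × List String)) : Decidable (Spec_detect_job_id_conflicts configs_with_jobs out) := by unfold Spec_detect_job_id_conflicts; infer_instance

-- ===== CLAIM (what is proved, stated in full; the proofs are below) =====
def Claim_equal_detect_job_id_conflicts : Prop := ∀ (configs_with_jobs : List (String × (List (List (String × String))))), Dom_detect_job_id_conflicts configs_with_jobs → Pre_detect_job_id_conflicts configs_with_jobs → Spec_detect_job_id_conflicts configs_with_jobs (detect_job_id_conflicts configs_with_jobs)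

-- ===== LEMMAS AND PROOFS =====

-- the flat list of (job id, config file) occurrences, in traversal order
def pvOcc (cfgs : List (String × (List (List (String × String))))) : List (String × String) :=
  cfgs.flatMap (fun p => p.2.map (fun job => (pvJobId job, p.1)))

def pvIds (cfgs : List (String × (List (List (String × String))))) : List String :=
  (pvOcc cfgs).map Prod.fst

lemma pvFlattenA (cfgs : List (String × (List (List (String × String))))) (d0 : PySem.Dict String (List String)) :
    cfgs.foldl (fun d p => p.2.foldl (fun d job => d.modify (pvJobId job) [] (· ++ [p.1])) d) d0
      = (pvOcc cfgs).foldl (fun d o => d.modify o.1 [] (· ++ [o.2])) d0 := by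
  induction cfgs generalizing d0 with
  | nil => rfl
  | cons a l ih => simp [pvOcc, List.foldl_append, List.foldl_map, ih]

lemma pvFlattenC (cfgs : List (String × (List (List (String × String))))) (c0 : PySem.Dict String Int) :
    cfgs.foldl (fun c p => p.2.foldl (fun c job => c.modify (pvJobId job) 0 (· + 1)) c) c0
      = (pvIds cfgs).foldl (fun c k => c.modify k 0 (· + 1)) c0 := by
  induction cfgs generalizing c0 with
  | nil => rfl
  | cons a l ih => simp [pvOcc, pvIds, List.foldl_append, List.foldl_map, ih]

lemma pvFlattenB (c : PySem.Dict String Int) (cfgs : List (String × (List (List (String × String))))) (d0 : PySem.Dict String (List String)) :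
    cfgs.foldl (fun d p => p.2.foldl (fun d job =>
        if (1 : Int) < c.getD (pvJobId job) 0 then d.modify (pvJobId job) [] (· ++ [p.1]) else d) d) d0
      = (pvOcc cfgs).foldl (fun d o =>
        if (1 : Int) < c.getD o.1 0 then d.modify o.1 [] (· ++ [o.2]) else d) d0 := by
  induction cfgs generalizing d0 with
  | nil => rfl
  | cons a l ih => simp [pvOcc, List.foldl_append, List.foldl_map, ih]

lemma pvFoldlIte {σ : Type} (c : String × String → Prop) [DecidablePred c] (F : σ → String × String → σ) :
    ∀ (L : List (String × String)) (d : σ),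
      L.foldl (fun d o => if c o then F d o else d) d
        = (L.filter (fun o => decide (c o))).foldl F d := by
  intro L
  induction L with
  | nil => intro d; rfl
  | cons a l ih => intro d; by_cases h : c a <;> simp [h, ih]

-- the grouping fold, in closed form: keys are the distinct ids in order, value = configs in order
lemma pvDictItems (L : List (String × String)) :
    ((L.foldl (fun d o => d.modify o.1 [] (· ++ [o.2])) PySem.Dict.empty).items)
      = (PySem.Set.ofList (L.map Prod.fst)).map
          (fun k => (k, (L.filter (fun o => o.1 == k)).map Prod.snd)) := by
  have hnd : ((L.foldl (fun d o => d.modify o.1 [] (· ++ [o.2])) PySem.Dict.empty).keys).Nodup := by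
    exact PySem.Dict.nodup_keys_foldl_modify_key L Prod.fst [] (fun _ o => (· ++ [o.2]))
      PySem.Dict.empty (by simp)
  rw [PySem.Dict.items_eq_map_keys _ hnd []]
  rw [PySem.Dict.keys_foldl_modify_key L Prod.fst [] (fun _ o => (· ++ [o.2]))]
  simp [PySem.Set.update_nil_left, PySem.Dict.getD_foldl_modify_append]

lemma pvDiscardFilter (q : String → Bool) (s : List String) (x : String) :
    (PySem.Set.discard s x).filter q = PySem.Set.discard (s.filter q) x := by
  simp only [PySem.Set.discard, List.filter_filter]
  exact List.filter_congr (fun a _ => Bool.and_comm _ _)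

lemma pvFilterDiscard_of_neg (q : String → Bool) (s : List String) (x : String) (h : q x = false) :
    (PySem.Set.discard s x).filter q = s.filter q := by
  simp only [PySem.Set.discard, List.filter_filter]
  exact List.filter_congr (fun a _ => by by_cases hx : a = x <;> simp [hx, h])

lemma pvOfListFilter (q : String → Bool) (xs : List String) :
    PySem.Set.ofList (xs.filter q) = (PySem.Set.ofList xs).filter q := by
  induction xs with
  | nil => rfl
  | cons x l ih =>
    by_cases h : q x
    · rw [List.filter_cons_of_pos h, PySem.Set.ofList_cons, PySem.Set.ofList_cons,
        List.filter_cons_of_pos h, ih, pvDiscardFilter]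
    · have h' : q x = false := by simpa using h
      rw [List.filter_cons_of_neg (by simp [h']), PySem.Set.ofList_cons,
        List.filter_cons_of_neg (by simp [h']), ih, pvFilterDiscard_of_neg q _ x h']

lemma pvLenFilter (L : List (String × String)) (k : String) :
    (L.filter (fun o => o.1 == k)).length = (L.map Prod.fst).count k := by
  rw [List.count_eq_countP, List.countP_map, ← List.countP_eq_length_filter]
  rfl

theorem pvMain (cfgs : List (String × (List (List (String × String))))) :
    detect_job_id_conflicts cfgs = detect_job_id_conflicts_alt cfgs := by
  simp only [detect_job_id_conflicts, detect_job_id_conflicts_alt]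
  rw [pvFlattenA, pvFlattenC, pvFlattenB]
  have hc : ∀ k, ((pvIds cfgs).foldl (fun c k => c.modify k 0 (· + 1)) PySem.Dict.empty).getD k 0
      = (((pvIds cfgs).count k : Int)) := by
    intro k; rw [PySem.Dict.getD_foldl_modify_add_one]; simp
  simp only [hc]
  rw [pvFoldlIte (fun o => (1 : Int) < ((pvIds cfgs).count o.1 : Int))]
  rw [pvDictItems, pvDictItems, List.filter_map]
  set L := pvOcc cfgs with hL
  set q : String → Bool := fun k => decide ((1 : Int) < ((pvIds cfgs).count k : Int)) with hq
  have hids : pvIds cfgs = L.map Prod.fst := rfl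
  have hLq : (L.filter (fun o => decide ((1 : Int) < ((pvIds cfgs).count o.1 : Int))))
      = L.filter (fun o => q o.1) := rfl
  rw [hLq]
  have hmapfst : (L.filter (fun o => q o.1)).map Prod.fst = (L.map Prod.fst).filter q := by
    rw [List.filter_map]; rfl
  rw [hmapfst, pvOfListFilter]
  have hpred : ((fun p => decide (1 < p.2.length)) ∘
      (fun k => (k, (L.filter (fun o => o.1 == k)).map Prod.snd))) = q := by
    funext k
    simp only [Function.comp, List.length_map, pvLenFilter, hq, decide_eq_decide, ← hids]
    exact Iff.symm (by exact_mod_cast Iff.rfl)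
  rw [hpred, ← hids]
  apply List.map_congr_left
  intro k hk
  have hqk : q k = true := (List.mem_filter.mp hk).2
  have : L.filter (fun o => o.1 == k) = (L.filter (fun o => q o.1)).filter (fun o => o.1 == k) := by
    rw [List.filter_filter]
    refine (List.filter_congr ?_).symm
    intro o _
    by_cases h : o.1 = k
    · simp [h, hqk]
    · simp [h]
  rw [← this]

-- ===== VERDICT (by name: the statement is the Claim_ definition above) =====
theorem detect_job_id_conflicts_spec : Claim_equal_detect_job_id_conflicts := by
  intro cfgs _ _
  unfold Spec_detect_job_id_conflicts
  exact pvMain cfgs
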